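-- pv_equiv track=rewrite | github.com/dochammoc123/sync-music-libraries | library_sync_and_upgrade.py | choose_album_year
-- ===== SOURCE A (Python) =====
-- def choose_album_year(items) -> str:
--     """
--     Given a list of (path, tags) for an album, pick a canonical year
--     to use in the folder name.
--
--     Strategy:
--       - Collect all non-empty year strings from tags["year"].
--       - If none, return "" (no year in folder).
--       - Otherwise:
--           * Find the most common year.
--           * If there's a tie, pick the earliest year numerically.
--     """
--     years = [t["year"] for (_p, t) in items if t.get("year")]
--     if not years:
--         return ""
--
--     from collections import Counter
--     counts = Counter(years)
--     max_count = max(counts.values())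
--     candidates = [y for y, c in counts.items() if c == max_count]
--
--     numeric_candidates = []
--     for y in candidates:
--         try:
--             numeric_candidates.append((int(y[:4]), y))
--         except ValueError:
--             numeric_candidates.append((9999, y))
--
--     numeric_candidates.sort(key=lambda x: (x[0], x[1]))
--     return numeric_candidates[0][1]
-- ===== SOURCE B (Python) =====
-- def choose_album_year(items) -> str:
--     # Alternative strategy: sort the years once by (numeric prefix, string),
--     # then find the longest run in a single pass; the sort order makes the
--     # first longest run the earliest year, so no Counter is needed.
--     years = [t["year"] for (_p, t) in items if t.get("year")]
--     if not years:
--         return ""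
--
--     def key(y):
--         try:
--             return (int(y[:4]), y)
--         except ValueError:
--             return (9999, y)
--
--     years.sort(key=key)
--
--     best, best_len = "", 0
--     cur, cur_len = None, 0
--     for y in years:
--         if cur == y:
--             cur_len += 1
--         else:
--             cur, cur_len = y, 1
--         if cur_len > best_len:
--             best, best_len = y, cur_len
--     return best
-- ===== Notes on version B (the rewrite author's own statement) =====
-- stated objective: alternative
-- what changed: Replaces Counter hash-counting + max + filter + candidate sort with a single sort of all years by (numeric prefix, string) followed by one linear scan that tracks the longest run of equal strings, the sort order supplying the earliest-year tie-break.
import Mathlib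
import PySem

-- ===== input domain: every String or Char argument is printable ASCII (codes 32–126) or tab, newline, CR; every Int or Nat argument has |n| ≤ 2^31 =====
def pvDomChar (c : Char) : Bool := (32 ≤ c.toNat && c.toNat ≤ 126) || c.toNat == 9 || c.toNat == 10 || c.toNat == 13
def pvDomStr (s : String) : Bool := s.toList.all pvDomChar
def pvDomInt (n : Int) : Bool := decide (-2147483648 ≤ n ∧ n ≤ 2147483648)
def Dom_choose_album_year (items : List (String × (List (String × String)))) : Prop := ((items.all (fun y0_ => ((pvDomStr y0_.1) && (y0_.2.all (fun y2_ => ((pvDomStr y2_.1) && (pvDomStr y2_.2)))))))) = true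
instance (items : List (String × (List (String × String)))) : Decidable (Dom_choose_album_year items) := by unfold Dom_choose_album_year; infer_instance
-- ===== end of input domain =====

-- B replaces Counter + max + filter + candidate-sort by one sort of all years by
-- (numeric prefix, string) followed by a single longest-run scan (alternative
-- decomposition, similar cost); return values proved equal on all inputs.

-- ===== PORT A =====
-- years = [t["year"] for (_p, t) in items if t.get("year")]  (identical in both Pythons)
def pvYears (items : List (String × (List (String × String)))) : List String :=
  items.filterMap (fun pt =>
    match (PySem.Dict.mk pt.2).get? "year" with
    | some s => if s = "" then none else some s
    | none => none)

-- try: int(y[:4]) except ValueError: 9999  (A's loop body and B's key() compute this identically)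
def pvNumKey (y : String) : Int :=
  match PySem.Int.ofChars? (PySem.List.slice y.toList none (some 4)) with
  | some n => n
  | none => 9999

def choose_album_year (items : List (String × (List (String × String)))) : String :=
  let years := pvYears items
  if years = [] then ""
  else
    let counts := PySem.Dict.counter (κ := String) years
    match PySem.List.max? counts.values (fun v => v) with
    | none => ""  -- unreachable: counts is nonempty, max(...) does not raise
    | some max_count =>
      let candidates := (counts.items.filter (fun yc => yc.2 == max_count)).map (fun yc => yc.1)
      let numeric_candidates := candidates.foldl (fun acc y => acc ++ [(pvNumKey y, y)]) []
      match PySem.List.sorted2 numeric_candidates (fun x => x.1) (fun x => x.2) false with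
      | (_, y) :: _ => y
      | [] => ""  -- unreachable: candidates is nonempty

-- ===== PORT B =====
-- loop body of B's single scan over the sorted years: state (best, best_len, cur, cur_len)
def pvStep (st : String × Int × Option String × Int) (y : String) :
    String × Int × Option String × Int :=
  let cur' := if st.2.2.1 == some y then st.2.2.1 else some y
  let cur_len' := if st.2.2.1 == some y then st.2.2.2 + 1 else 1
  if cur_len' > st.2.1 then (y, cur_len', cur', cur_len')
  else (st.1, st.2.1, cur', cur_len')

def choose_album_year_alt (items : List (String × (List (String × String)))) : String :=
  let years := pvYears items
  if years = [] then ""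
  else
    let sortedYears := PySem.List.sorted2 years pvNumKey (fun y => y) false
    (sortedYears.foldl pvStep ("", (0 : Int), (none : Option String), (0 : Int))).1

-- ===== PRECONDITION & SPEC =====
def Spec_choose_album_year (items : List (String × (List (String × String)))) (out : String) : Prop := out = choose_album_year_alt items
instance (items : List (String × (List (String × String)))) (out : String) : Decidable (Spec_choose_album_year items out) := by unfold Spec_choose_album_year; infer_instance

-- ===== CLAIM (what is proved, stated in full; the proofs are below) =====
def Claim_equal_choose_album_year : Prop := ∀ (items : List (String × (List (String × String)))), Dom_choose_album_year items → Spec_choose_album_year items (choose_album_year items)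

-- ===== LEMMAS AND PROOFS =====

-- The comparison key both programs sort by: (int(y[:4]) or 9999, y), lexicographically.
def pvKey (y : String) : Lex (Int × String) := toLex (pvNumKey y, y)

theorem pvKey_inj (a b : String) (h : pvKey a = pvKey b) : a = b := by
  have := congrArg (fun x => (ofLex x).2) h
  simpa [pvKey] using this

theorem pv_hfun {α : Type} (k1 : α → Int) (k2 : α → String) (a b : α) :
    (decide (k1 a < k1 b) || (!decide (k1 b < k1 a) && decide (k2 a < k2 b)))
      = decide (toLex (k1 a, k2 a) < toLex (k1 b, k2 b)) := by
  have hiff : (k1 a < k1 b ∨ (¬ k1 b < k1 a ∧ k2 a < k2 b))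
      ↔ toLex (k1 a, k2 a) < toLex (k1 b, k2 b) := by
    rw [Prod.Lex.lt_iff]
    simp only [ofLex_toLex]
    constructor
    · rintro (h | ⟨h1, h2⟩)
      · exact Or.inl h
      · rcases lt_or_eq_of_le (not_lt.mp h1) with h' | h'
        · exact Or.inl h'
        · exact Or.inr ⟨h', h2⟩
    · rintro (h | ⟨h1, h2⟩)
      · exact Or.inl h
      · exact Or.inr ⟨by simp [h1], h2⟩
  rw [Bool.eq_iff_iff]
  simp only [Bool.or_eq_true, Bool.and_eq_true, Bool.not_eq_true', decide_eq_true_eq,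
    decide_eq_false_iff_not]
  exact hiff

-- Python's sort with a 2-tuple key IS the sort by the lexicographic key.
theorem pv_sorted2_eq {α : Type} (xs : List α) (k1 : α → Int) (k2 : α → String) :
    PySem.List.sorted2 xs k1 k2 false
      = PySem.List.sorted xs (fun a => toLex (k1 a, k2 a)) false := by
  rw [PySem.List.sorted_eq_foldl_insertBy]
  have hb : (fun a b : α => decide (k1 a < k1 b) || (!decide (k1 b < k1 a) && decide (k2 a < k2 b)))
      = fun a b => decide (toLex (k1 a, k2 a) < toLex (k1 b, k2 b)) := by
    funext a b; exact pv_hfun k1 k2 a b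
  show xs.foldl (fun acc x => PySem.List.insertBy (fun a b : α => decide (k1 a < k1 b) || (!decide (k1 b < k1 a) && decide (k2 a < k2 b))) x acc) [] = _
  rw [hb]

-- the maximal multiplicity in a list
def pvMc (p : List String) : Nat := (p.map (fun y => p.count y)).foldr max 0

theorem pv_le_foldr_max (l : List Nat) (a : Nat) (h : a ∈ l) : a ≤ l.foldr max 0 := by
  induction l with
  | nil => cases h
  | cons x t ih =>
    simp only [List.foldr_cons]
    rcases List.mem_cons.mp h with rfl | h'
    · exact le_max_left _ _
    · exact le_trans (ih h') (le_max_right _ _)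

theorem pv_foldr_max_mem (l : List Nat) (h : l ≠ []) : l.foldr max 0 ∈ l := by
  induction l with
  | nil => exact absurd rfl h
  | cons x t ih =>
    rw [List.foldr_cons]
    cases t with
    | nil => simp
    | cons z t' =>
      have hm := ih (by simp)
      rcases le_total (List.foldr max 0 (z :: t')) x with hx | hx
      · rw [max_eq_left hx]; exact List.mem_cons_self
      · rw [max_eq_right hx]; exact List.mem_cons_of_mem _ hm

theorem pvMc_le (p : List String) (y : String) (h : y ∈ p) : p.count y ≤ pvMc p :=
  pv_le_foldr_max _ _ (List.mem_map.mpr ⟨y, h, rfl⟩)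

theorem pvMc_attained (p : List String) (h : p ≠ []) : ∃ y ∈ p, p.count y = pvMc p := by
  have hm := pv_foldr_max_mem (p.map (fun y => p.count y)) (by simpa using h)
  rcases List.mem_map.mp hm with ⟨y, hy, he⟩
  exact ⟨y, hy, he⟩

-- what both programs compute: the key-least among the most frequent years
def pvBest (ys : List String) (b : String) : Prop :=
  b ∈ ys ∧ ys.count b = pvMc ys ∧ ∀ y ∈ ys, ys.count y = pvMc ys → pvKey b ≤ pvKey y

theorem pvBest_unique (ys : List String) (a b : String)
    (ha : pvBest ys a) (hb : pvBest ys b) : a = b := by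
  have h1 : pvKey a ≤ pvKey b := ha.2.2 b hb.1 hb.2.1
  have h2 : pvKey b ≤ pvKey a := hb.2.2 a ha.1 ha.2.1
  exact pvKey_inj _ _ (le_antisymm h1 h2)

theorem pvMc_perm (ys zs : List String) (h : ys.Perm zs) : pvMc ys = pvMc zs := by
  by_cases hys : ys = []
  · subst hys
    rw [List.Perm.eq_nil h.symm]
  · have hzs : zs ≠ [] := by
      intro h0; subst h0; exact hys h.eq_nil
    apply Nat.le_antisymm
    · rcases pvMc_attained ys hys with ⟨y, hy, he⟩
      calc pvMc ys = ys.count y := he.symm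
        _ = zs.count y := h.count_eq y
        _ ≤ pvMc zs := pvMc_le _ _ (h.mem_iff.mp hy)
    · rcases pvMc_attained zs hzs with ⟨y, hy, he⟩
      calc pvMc zs = zs.count y := he.symm
        _ = ys.count y := (h.count_eq y).symm
        _ ≤ pvMc ys := pvMc_le _ _ (h.mem_iff.mpr hy)

theorem pvBest_perm (ys zs : List String) (h : ys.Perm zs) (b : String)
    (hb : pvBest ys b) : pvBest zs b := by
  refine ⟨h.mem_iff.mp hb.1, ?_, ?_⟩
  · rw [← h.count_eq, hb.2.1, pvMc_perm ys zs h]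
  · intro y hy hc
    exact hb.2.2 y (h.mem_iff.mpr hy) (by rw [h.count_eq, hc, pvMc_perm ys zs h])

-- foldl-append builds the map
theorem pv_foldl_append {α β : Type} (l : List α) (f : α → β) (acc : List β) :
    l.foldl (fun acc y => acc ++ [f y]) acc = acc ++ l.map f := by
  induction l generalizing acc with
  | nil => simp
  | cons x t ih => simp [ih]

theorem pv_count_append (p : List String) (y z : String) :
    (p ++ [y]).count z = p.count z + if z = y then 1 else 0 := by
  by_cases h : z = y
  · subst h; simp [List.count_append]
  · have h' : ¬ y = z := fun he => h he.symm
    simp [List.count_append, h, h']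

theorem pvMc_append (p : List String) (y : String) (hp : p ≠ []) :
    pvMc (p ++ [y]) = max (pvMc p) (p.count y + 1) := by
  have hys : p ++ [y] ≠ [] := by simp
  apply Nat.le_antisymm
  · rcases pvMc_attained _ hys with ⟨z, hz, he⟩
    rw [← he, pv_count_append]
    by_cases hzy : z = y
    · subst hzy
      simp only [if_pos]
      exact le_max_right _ _
    · have hzp : z ∈ p := by
        rcases List.mem_append.mp hz with h' | h'
        · exact h'
        · simp at h'; exact absurd h' hzy
      have h1 := pvMc_le p z hzp
      simp only [if_neg hzy]
      have : p.count z + 0 ≤ pvMc p := by omega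
      exact le_trans this (le_max_left _ _)
  · have h1 : p.count y + 1 ≤ pvMc (p ++ [y]) := by
      have hc : (p ++ [y]).count y = p.count y + 1 := by
        rw [pv_count_append]; simp
      rw [← hc]; exact pvMc_le _ _ (by simp)
    have h2 : pvMc p ≤ pvMc (p ++ [y]) := by
      rcases pvMc_attained p hp with ⟨z, hz, he⟩
      have hc : p.count z ≤ (p ++ [y]).count z := by
        rw [pv_count_append]; omega
      calc pvMc p = p.count z := he.symm
        _ ≤ (p ++ [y]).count z := hc
        _ ≤ pvMc (p ++ [y]) := pvMc_le _ _ (by simp [hz])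
    omega

-- ---- A-side characterisation ----
theorem pvA_best (items : List (String × (List (String × String))))
    (h : pvYears items ≠ []) : pvBest (pvYears items) (choose_album_year items) := by
  simp only [choose_album_year]
  rw [if_neg h]
  have hvals : (PySem.Dict.counter (κ := String) (pvYears items)).values
      = (PySem.Set.ofList (pvYears items)).map (fun k => ((pvYears items).count k : Int)) := by
    simp [PySem.Dict.values, PySem.Dict.items_counter, List.map_map, Function.comp]
  obtain ⟨y0, hy0⟩ : ∃ y0, y0 ∈ pvYears items := by
    cases hys : pvYears items with
    | nil => exact absurd hys h
    | cons a t => exact ⟨a, by simp⟩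
  rcases pvMc_attained _ h with ⟨y1, hy1, he1⟩
  split
  · rename_i hmax
    exfalso
    rw [PySem.List.max?_eq_none_iff, hvals] at hmax
    simp only [List.map_eq_nil_iff] at hmax
    have : y0 ∈ PySem.Set.ofList (pvYears items) := (PySem.Set.mem_ofList _ _).mpr hy0
    rw [hmax] at this
    simp at this
  · rename_i M hmax
    have hMmem := PySem.List.max?_mem hmax
    have hMmax := PySem.List.max?_isMax hmax
    rw [hvals] at hMmem
    rcases List.mem_map.mp hMmem with ⟨k0, hk0, hk0e⟩
    have hk0ys : k0 ∈ pvYears items := (PySem.Set.mem_ofList _ _).mp hk0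
    have hMle : M ≤ (pvMc (pvYears items) : Int) := by
      rw [← hk0e]; exact_mod_cast pvMc_le _ k0 hk0ys
    have hMge : (pvMc (pvYears items) : Int) ≤ M := by
      have hmem : ((pvYears items).count y1 : Int)
          ∈ (PySem.Dict.counter (κ := String) (pvYears items)).values := by
        rw [hvals]
        exact List.mem_map.mpr ⟨y1, (PySem.Set.mem_ofList _ _).mpr hy1, rfl⟩
      have := hMmax _ hmem
      rw [he1] at this
      exact this
    have hM : M = (pvMc (pvYears items) : Int) := le_antisymm hMle hMge
    have hcand : ∀ z, (z ∈ ((PySem.Dict.counter (κ := String) (pvYears items)).items.filter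
          (fun yc => yc.2 == M)).map (fun yc => yc.1))
        ↔ (z ∈ pvYears items ∧ (pvYears items).count z = pvMc (pvYears items)) := by
      intro z
      constructor
      · intro hz
        rcases List.mem_map.mp hz with ⟨a, ha, rfl⟩
        rcases List.mem_filter.mp ha with ⟨ham, hap⟩
        rw [PySem.Dict.items_counter] at ham
        rcases List.mem_map.mp ham with ⟨k, hk, rfl⟩
        refine ⟨(PySem.Set.mem_ofList _ _).mp hk, ?_⟩
        have hbq : (((pvYears items).count k : Int) = M) := by
          have h2 := hap
          simp only [beq_iff_eq] at h2
          exact h2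
        rw [hM] at hbq
        exact_mod_cast hbq
      · rintro ⟨hz, hc⟩
        refine List.mem_map.mpr ⟨(z, ((pvYears items).count z : Int)), List.mem_filter.mpr ⟨?_, ?_⟩, rfl⟩
        · rw [PySem.Dict.items_counter]
          exact List.mem_map.mpr ⟨z, (PySem.Set.mem_ofList _ _).mpr hz, rfl⟩
        · simp only [beq_iff_eq]
          rw [hM]
          exact_mod_cast hc
    rw [pv_foldl_append, List.nil_append, pv_sorted2_eq]
    have hy1c : y1 ∈ ((PySem.Dict.counter (κ := String) (pvYears items)).items.filter
        (fun yc => yc.2 == M)).map (fun yc => yc.1) := (hcand y1).mpr ⟨hy1, he1⟩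
    rcases hsorted : PySem.List.sorted
        ((((PySem.Dict.counter (κ := String) (pvYears items)).items.filter
          (fun yc => yc.2 == M)).map (fun yc => yc.1)).map (fun y => (pvNumKey y, y)))
        (fun x => toLex (x.1, x.2)) false with _ | ⟨⟨m1, m2⟩, t⟩
    · exfalso
      have hperm := PySem.List.sorted_perm
        ((((PySem.Dict.counter (κ := String) (pvYears items)).items.filter
          (fun yc => yc.2 == M)).map (fun yc => yc.1)).map (fun y => (pvNumKey y, y)))
        (fun x => toLex (x.1, x.2)) false
      rw [hsorted] at hperm
      have hnil := List.Perm.eq_nil hperm.symm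
      rw [List.map_eq_nil_iff] at hnil
      rw [hnil] at hy1c
      simp at hy1c
    · show pvBest (pvYears items) m2
      have hm0mem : (m1, m2) ∈ (((PySem.Dict.counter (κ := String) (pvYears items)).items.filter
          (fun yc => yc.2 == M)).map (fun yc => yc.1)).map (fun y => (pvNumKey y, y)) := by
        have hm : (m1, m2) ∈ PySem.List.sorted
            ((((PySem.Dict.counter (κ := String) (pvYears items)).items.filter
              (fun yc => yc.2 == M)).map (fun yc => yc.1)).map (fun y => (pvNumKey y, y)))
            (fun x => toLex (x.1, x.2)) false := by
          rw [hsorted]; exact List.mem_cons_self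
        exact (PySem.List.mem_sorted _ _ _ _).mp hm
      rcases List.mem_map.mp hm0mem with ⟨yc, hyc, heq⟩
      have hm2 : yc = m2 := congrArg Prod.snd heq
      have hm1 : pvNumKey m2 = m1 := by rw [← hm2]; exact congrArg Prod.fst heq
      subst hm2
      have hhead := PySem.List.key_head_sorted_le _ _ hsorted
      rcases (hcand yc).mp hyc with ⟨hycys, hyccnt⟩
      refine ⟨hycys, hyccnt, ?_⟩
      intro z hz hzc
      have hzin : (pvNumKey z, z) ∈ (((PySem.Dict.counter (κ := String) (pvYears items)).items.filter
          (fun yc => yc.2 == M)).map (fun yc => yc.1)).map (fun y => (pvNumKey y, y)) :=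
        List.mem_map.mpr ⟨z, (hcand z).mpr ⟨hz, hzc⟩, rfl⟩
      have hle := hhead _ hzin
      simpa [pvKey, hm1] using hle

-- ---- B-side characterisation ----
def pvInv (p : List String) (st : String × Int × Option String × Int) : Prop :=
  if p = [] then st = ("", 0, none, 0)
  else ∃ l, p.getLast? = some l ∧ st.2.2.1 = some l ∧ st.2.2.2 = (p.count l : Int)
        ∧ st.2.1 = (pvMc p : Int) ∧ pvBest p st.1

theorem pv_pairwise_getLast {R : String → String → Prop} (p : List String)
    (hp : p.Pairwise R) (l : String) (hl : p.getLast? = some l) :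
    ∀ z ∈ p, z = l ∨ R z l := by
  induction p with
  | nil => simp
  | cons x t ih =>
    intro z hz
    cases t with
    | nil =>
      have hxl : x = l := by simpa using hl
      have hzx : z = x := by simpa using hz
      exact Or.inl (hzx.trans hxl)
    | cons w t' =>
      have hl' : (w :: t').getLast? = some l := by
        simpa [List.getLast?_cons_cons] using hl
      rcases List.mem_cons.mp hz with rfl | hz'
      · right
        have hlm : l ∈ w :: t' := List.mem_of_getLast? hl'
        exact (List.pairwise_cons.mp hp).1 l hlm
      · exact ih (List.pairwise_cons.mp hp).2 hl' z hz'

theorem pvStepInv (p : List String) (y : String) (st : String × Int × Option String × Int)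
    (hInv : pvInv p st)
    (hPWp : p.Pairwise (fun a b => pvKey a ≤ pvKey b))
    (hy : ∀ z ∈ p, pvKey z ≤ pvKey y) :
    pvInv (p ++ [y]) (pvStep st y) := by
  obtain ⟨b, bl, cur, cl⟩ := st
  have hne : p ++ [y] ≠ [] := by simp
  by_cases hp : p = []
  · subst hp
    rw [pvInv, if_pos rfl] at hInv
    simp only [Prod.mk.injEq] at hInv
    obtain ⟨rfl, rfl, rfl, rfl⟩ := hInv
    rw [pvInv, if_neg hne]
    refine ⟨y, by simp, ?_, ?_, ?_, ?_⟩
    · rfl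
    · simp [pvStep]
    · simp [pvStep, pvMc]
    · refine ⟨by simp [pvStep], by simp [pvStep, pvMc], ?_⟩
      intro z hz _
      have : z = y := by simpa using hz
      simp [this, pvStep]
  · rw [pvInv, if_neg hp] at hInv
    obtain ⟨l, hl, hcur, hcl, hbl, hbest⟩ := hInv
    simp only at hcur hcl hbl hbest
    subst hcur; subst hcl; subst hbl
    have hlmem : l ∈ p := List.mem_of_getLast? hl
    have hcl1 : 1 ≤ p.count l := List.count_pos_iff.mpr hlmem
    have hmle : p.count l ≤ pvMc p := pvMc_le p l hlmem
    have hmc1 : 1 ≤ pvMc p := le_trans hcl1 hmle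
    rw [pvInv, if_neg hne]
    by_cases hly : l = y
    · subst hly
      have hcy : (p ++ [l]).count l = p.count l + 1 := by
        rw [pv_count_append]; simp
      have hstep : pvStep (b, (pvMc p : Int), some l, (p.count l : Int)) l
          = if (p.count l : Int) + 1 > (pvMc p : Int)
            then (l, (p.count l : Int) + 1, some l, (p.count l : Int) + 1)
            else (b, (pvMc p : Int), some l, (p.count l : Int) + 1) := by
        simp [pvStep]
      rw [hstep]
      by_cases hgt : ((p.count l : Int) + 1 > (pvMc p : Int))
      · rw [if_pos hgt]
        have hkm : p.count l = pvMc p := by omega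
        have hmc' : pvMc (p ++ [l]) = pvMc p + 1 := by
          rw [pvMc_append p l hp, hkm, Nat.max_eq_right (Nat.le_succ _)]
        refine ⟨l, by simp, rfl, ?_, ?_, ?_⟩
        · rw [hcy]; push_cast; ring
        · rw [hmc', hkm]; push_cast; ring
        · refine ⟨by simp, ?_, ?_⟩
          · rw [hcy, hmc', hkm]
          · intro z hz hzc
            by_cases hzy : z = l
            · subst hzy; exact le_refl _
            · exfalso
              have hzp : z ∈ p := by
                rcases List.mem_append.mp hz with h' | h'
                · exact h'
                · exact absurd (by simpa using h') hzy
              have h1 := pvMc_le p z hzp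
              rw [pv_count_append, if_neg hzy, hmc'] at hzc
              omega
      · rw [if_neg hgt]
        have hk1 : p.count l + 1 ≤ pvMc p := by omega
        have hmc' : pvMc (p ++ [l]) = pvMc p := by
          rw [pvMc_append p l hp, Nat.max_eq_left (by omega)]
        have hbne : b ≠ l := by
          intro he
          have hcb := hbest.2.1
          rw [he] at hcb
          omega
        refine ⟨l, by simp, rfl, ?_, ?_, ?_⟩
        · rw [hcy]; push_cast; ring
        · rw [hmc']
        · refine ⟨List.mem_append.mpr (Or.inl hbest.1), ?_, ?_⟩
          · have hcb := hbest.2.1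
            rw [pv_count_append, if_neg hbne, hmc']
            omega
          · intro z hz hzc
            by_cases hzy : z = l
            · subst hzy; exact hy b hbest.1
            · have hzp : z ∈ p := by
                rcases List.mem_append.mp hz with h' | h'
                · exact h'
                · exact absurd (by simpa using h') hzy
              apply hbest.2.2 z hzp
              rw [pv_count_append, if_neg hzy, hmc'] at hzc
              omega
    · have hynp : y ∉ p := by
        intro hyp
        rcases pv_pairwise_getLast p hPWp l hl y hyp with h' | h'
        · exact hly h'.symm
        · exact hly (pvKey_inj l y (le_antisymm (hy l hlmem) h'))
      have hcy0 : p.count y = 0 := List.count_eq_zero.mpr hynp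
      have hbeq : ((some l : Option String) == some y) = false := by simp [hly]
      have hngt : ¬((1 : Int) > (pvMc p : Int)) := by omega
      have hstep : pvStep (b, (pvMc p : Int), some l, (p.count l : Int)) y
          = (b, (pvMc p : Int), some y, 1) := by
        simp [pvStep, hbeq, hngt]
      rw [hstep]
      have hmc' : pvMc (p ++ [y]) = pvMc p := by
        rw [pvMc_append p y hp, hcy0, Nat.max_eq_left (by omega)]
      refine ⟨y, by simp, rfl, ?_, ?_, ?_⟩
      · rw [pv_count_append, if_pos rfl, hcy0]; norm_num
      · rw [hmc']
      · have hbny : b ≠ y := fun he => hynp (he ▸ hbest.1)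
        refine ⟨List.mem_append.mpr (Or.inl hbest.1), ?_, ?_⟩
        · have hcb := hbest.2.1
          rw [pv_count_append, if_neg hbny, hmc']
          omega
        · intro z hz hzc
          by_cases hzy : z = y
          · subst hzy; exact hy b hbest.1
          · have hzp : z ∈ p := by
              rcases List.mem_append.mp hz with h' | h'
              · exact h'
              · exact absurd (by simpa using h') hzy
            apply hbest.2.2 z hzp
            rw [pv_count_append, if_neg hzy, hmc'] at hzc
            omega

theorem pvLoop (rest p : List String) (st : String × Int × Option String × Int)
    (hInv : pvInv p st)
    (hPW : (p ++ rest).Pairwise (fun a b => pvKey a ≤ pvKey b)) :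
    pvInv (p ++ rest) (rest.foldl pvStep st) := by
  induction rest generalizing p st with
  | nil => simpa using hInv
  | cons y rest' ih =>
    have hp : p.Pairwise (fun a b => pvKey a ≤ pvKey b) :=
      hPW.sublist (List.sublist_append_left p (y :: rest'))
    have hy : ∀ z ∈ p, pvKey z ≤ pvKey y := by
      have h3 := (List.pairwise_append.mp hPW).2.2
      intro z hz
      exact h3 z hz y (by simp)
    have hInv' := pvStepInv p y st hInv hp hy
    have hPW' : ((p ++ [y]) ++ rest').Pairwise (fun a b => pvKey a ≤ pvKey b) := by
      simpa using hPW
    have hfin := ih (p ++ [y]) (pvStep st y) hInv' hPW'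
    simpa using hfin

theorem pvInv_best (p : List String) (st : String × Int × Option String × Int)
    (hp : p ≠ []) (h : pvInv p st) : pvBest p st.1 := by
  rw [pvInv, if_neg hp] at h
  obtain ⟨l, _, _, _, _, hb⟩ := h
  exact hb

theorem pvB_best (items : List (String × (List (String × String))))
    (h : pvYears items ≠ []) : pvBest (pvYears items) (choose_album_year_alt items) := by
  simp only [choose_album_year_alt]
  rw [if_neg h]
  rw [pv_sorted2_eq]
  have hkey : (fun a : String => toLex (pvNumKey a, a)) = pvKey := rfl
  rw [hkey]
  have hperm : (PySem.List.sorted (pvYears items) pvKey false).Perm (pvYears items) :=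
    PySem.List.sorted_perm _ _ _
  have hpw : (PySem.List.sorted (pvYears items) pvKey false).Pairwise
      (fun a b => pvKey a ≤ pvKey b) := PySem.List.sorted_pairwise _ _
  have hsne : PySem.List.sorted (pvYears items) pvKey false ≠ [] := by
    intro h0
    rw [h0] at hperm
    exact h (List.Perm.eq_nil hperm.symm)
  have hinv := pvLoop (PySem.List.sorted (pvYears items) pvKey false) []
    ("", (0 : Int), (none : Option String), (0 : Int)) (by rw [pvInv, if_pos rfl]) (by simpa using hpw)
  rw [List.nil_append] at hinv
  exact pvBest_perm _ _ hperm _ (pvInv_best _ _ hsne hinv)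

-- ===== VERDICT (by name: the statement is the Claim_ definition above) =====
theorem choose_album_year_spec : Claim_equal_choose_album_year := by
  intro items _
  unfold Spec_choose_album_year
  by_cases h : pvYears items = []
  · simp [choose_album_year, choose_album_year_alt, h]
  · exact pvBest_unique _ _ _ (pvA_best items h) (pvB_best items h)
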